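-- pv_equiv track=rewrite | github.com/BenWeedon/pyrogi | src/engine/__init__.py | parse_text_into_characters
-- ===== SOURCE A (Python) =====
-- def parse_text_into_characters(text):
--     characters = []
--     is_escaping = False
--     group = None
--     for ch in text:
--         if ch == '\\':
--             if is_escaping:
--                 characters.append(ch)
--                 is_escaping = False
--             else:
--                 is_escaping = True
--         elif ch == '[':
--             if is_escaping:
--                 characters.append(ch)
--                 is_escaping = False
--             else:
--                 if group is not None:
--                     raise ValueError('You cannot start a character group within another group.')
--                 group = ''
--             is_escaping = False
--         elif ch == ']':
--             if is_escaping: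
--                 characters.append(ch)
--             else:
--                 if group is None:
--                     raise ValueError('You cannot end a character group that you have not started.')
--                 characters.append(group)
--                 group = None
--             is_escaping = False
--         else:
--             if is_escaping:
--                 raise ValueError('Invalid escape character \'' + ch + '\'.')
--             if group is None:
--                 characters.append(ch)
--             else:
--                 group += ch
--             is_escaping = False
--     if group is not None:
--         raise ValueError('You started a character group but did not finish it.')
--     return characters
-- ===== SOURCE B (Python) =====
-- def parse_text_into_characters(text):
--     # Phase 1: tokenize the text into a flat token list, resolving escapes here.
--     tokens = []
--     it = iter(text)
--     for ch in it:
--         if ch == '\\':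
--             nxt = next(it, None)
--             if nxt is None:
--                 break  # trailing lone backslash is dropped
--             if nxt not in '\\[]':
--                 raise ValueError('Invalid escape character \'' + nxt + '\'.')
--             tokens.append(('esc', nxt))
--         elif ch == '[':
--             tokens.append(('open', ''))
--         elif ch == ']':
--             tokens.append(('close', ''))
--         else:
--             tokens.append(('char', ch))
--     # Phase 2: fold the token stream into the character list with group handling.
--     characters = []
--     group = None
--     for kind, c in tokens:
--         if kind == 'esc':
--             characters.append(c)
--         elif kind == 'open':
--             if group is not None:
--                 raise ValueError('You cannot start a character group within another group.')
--             group = ''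
--         elif kind == 'close':
--             if group is None:
--                 raise ValueError('You cannot end a character group that you have not started.')
--             characters.append(group)
--             group = None
--         else:
--             if group is None:
--                 characters.append(c)
--             else:
--                 group += c
--     if group is not None:
--         raise ValueError('You started a character group but did not finish it.')
--     return characters
-- ===== Notes on version B (the rewrite author's own statement) =====
-- stated objective: alternative
-- what changed: Replaces A's single character loop with an is_escaping flag by a two-stage pipeline: a tokenizer that resolves escapes into a flat token stream, then a separate fold over tokens that handles groups.
import Mathlib
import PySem

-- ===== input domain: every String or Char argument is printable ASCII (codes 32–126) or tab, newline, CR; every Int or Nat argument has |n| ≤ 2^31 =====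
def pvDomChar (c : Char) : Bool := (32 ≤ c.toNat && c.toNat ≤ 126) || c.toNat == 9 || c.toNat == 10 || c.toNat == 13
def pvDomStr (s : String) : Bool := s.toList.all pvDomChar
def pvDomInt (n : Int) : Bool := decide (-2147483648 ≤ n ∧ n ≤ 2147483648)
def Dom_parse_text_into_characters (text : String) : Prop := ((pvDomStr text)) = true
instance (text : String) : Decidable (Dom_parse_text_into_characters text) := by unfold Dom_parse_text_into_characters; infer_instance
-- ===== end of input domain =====

-- B replaces A's one-pass loop with an is_escaping flag by a two-stage pipeline
-- (tokenize escapes first, then fold the token stream into groups); equivalence is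
-- proved on all texts on which A returns (Pre_ excludes exactly the ValueError inputs).

-- ===== PORT A =====
-- literal port of A's for-loop: state = (is_escaping, group, characters); the three
-- 'raise ValueError' branches return [] — they are unreachable under Pre_.
def pvAGo (l : List Char) (esc : Bool) (group : Option String) (acc : List String) : List String :=
  match l with
  | [] => match group with
          | some _ => []            -- raise: unfinished group
          | none => acc
  | c :: rest =>
    if c = '\\' then
      if esc then pvAGo rest false group (acc ++ ["\\"])
      else pvAGo rest true group acc
    else if c = '[' then
      if esc then pvAGo rest false group (acc ++ ["["])
      else match group with
           | some _ => []           -- raise: group within group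
           | none => pvAGo rest false (some "") acc
    else if c = ']' then
      if esc then pvAGo rest false group (acc ++ ["]"])
      else match group with
           | none => []             -- raise: end without start
           | some s => pvAGo rest false none (acc ++ [s])
    else
      if esc then []                -- raise: invalid escape character
      else match group with
           | none => pvAGo rest false group (acc ++ [String.mk [c]])
           | some s => pvAGo rest false (some (s.push c)) acc

def parse_text_into_characters (text : String) : List String :=
  pvAGo text.toList false none []

-- ===== PORT B =====
-- literal port of Source B's two phases.  Phase 1 (tokenizer): consume the text into a flat
-- token list, resolving '\'-escapes here (none = the invalid-escape ValueError; a trailing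
-- lone backslash ends tokenization).  Phase 2: fold the token stream into the character
-- list with the group state; error branches return [] as in port A.
inductive pvTok : Type
  | esc (c : Char)
  | opn
  | cls
  | chr (c : Char)
deriving DecidableEq, Repr

def pvTokenize (l : List Char) : Option (List pvTok) :=
  match l with
  | [] => some []
  | c :: rest =>
    if c = '\\' then
      match rest with
      | [] => some []               -- trailing lone backslash dropped
      | c2 :: rest' =>
        if c2 = '\\' ∨ c2 = '[' ∨ c2 = ']' then (pvTokenize rest').map (pvTok.esc c2 :: ·)
        else none                   -- raise: invalid escape character
    else if c = '[' then (pvTokenize rest).map (pvTok.opn :: ·)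
    else if c = ']' then (pvTokenize rest).map (pvTok.cls :: ·)
    else (pvTokenize rest).map (pvTok.chr c :: ·)

def pvAssemble (ts : List pvTok) (group : Option String) (acc : List String) : List String :=
  match ts with
  | [] => match group with
          | some _ => []            -- raise: unfinished group
          | none => acc
  | pvTok.esc c :: ts' => pvAssemble ts' group (acc ++ [String.mk [c]])
  | pvTok.opn :: ts' =>
      match group with
      | some _ => []                -- raise: group within group
      | none => pvAssemble ts' (some "") acc
  | pvTok.cls :: ts' =>
      match group with
      | none => []                  -- raise: end without start
      | some s => pvAssemble ts' none (acc ++ [s])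
  | pvTok.chr c :: ts' =>
      match group with
      | none => pvAssemble ts' group (acc ++ [String.mk [c]])
      | some s => pvAssemble ts' (some (s.push c)) acc

def parse_text_into_characters_alt (text : String) : List String :=
  match pvTokenize text.toList with
  | none => []                      -- raise: invalid escape character
  | some ts => pvAssemble ts none []

-- ===== PRECONDITION & SPEC =====
-- Closed-form well-formedness of the text (no run of either port): every backslash is followed
-- by one of '\', '[' , ']' (or ends the text), and unescaped brackets form balanced, unnested
-- groups; exactly the texts on which Python A returns without raising ValueError.
def pvWellFormed (l : List Char) (inGroup : Bool) : Bool :=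
  match l with
  | [] => !inGroup
  | c :: rest =>
    if c = '\\' then
      match rest with
      | [] => !inGroup
      | c2 :: rest' =>
        if c2 = '\\' ∨ c2 = '[' ∨ c2 = ']' then pvWellFormed rest' inGroup else false
    else if c = '[' then
      if inGroup then false else pvWellFormed rest true
    else if c = ']' then
      if inGroup then pvWellFormed rest false else false
    else pvWellFormed rest inGroup

def Pre_parse_text_into_characters (text : String) : Prop :=
  pvWellFormed text.toList false = true
instance (text : String) : Decidable (Pre_parse_text_into_characters text) := by
  unfold Pre_parse_text_into_characters; infer_instance

def pvWitness_parse_text_into_characters : String := "a[b]\\]"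

def Spec_parse_text_into_characters (text : String) (out : List String) : Prop :=
  out = parse_text_into_characters_alt text
instance (text : String) (out : List String) : Decidable (Spec_parse_text_into_characters text out) := by
  unfold Spec_parse_text_into_characters; infer_instance

-- ===== CLAIM (what is proved, stated in full; the proofs are below) =====
def Claim_equal_parse_text_into_characters : Prop := ∀ (text : String), Dom_parse_text_into_characters text → Pre_parse_text_into_characters text → Spec_parse_text_into_characters text (parse_text_into_characters text)

-- ===== LEMMAS AND PROOFS =====

-- On a well-formed text the tokenizer succeeds, and A's flag-carrying loop computes
-- the same list as assembling the token stream.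
lemma pv_main : ∀ (n : ℕ) (l : List Char), l.length ≤ n →
    ∀ (g : Option String) (acc : List String),
      pvWellFormed l g.isSome = true →
      ∃ ts, pvTokenize l = some ts ∧ pvAGo l false g acc = pvAssemble ts g acc := by
  intro n
  induction n with
  | zero =>
    intro l hl g acc hv
    have : l = [] := by cases l <;> simp_all
    subst this
    have : g = none := by cases g <;> simp_all [pvWellFormed]
    subst this
    exact ⟨[], rfl, by simp [pvAGo, pvAssemble]⟩
  | succ n ih =>
    intro l hl g acc hv
    rcases l with _ | ⟨c, rest⟩
    · have : g = none := by cases g <;> simp_all [pvWellFormed]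
      subst this
      exact ⟨[], rfl, by simp [pvAGo, pvAssemble]⟩
    · by_cases hc : c = '\\'
      · subst hc
        rcases rest with _ | ⟨c2, rest'⟩
        · have : g = none := by cases g <;> simp_all [pvWellFormed]
          subst this
          exact ⟨[], by simp [pvTokenize], by simp [pvAGo, pvAssemble]⟩
        · rw [pvWellFormed.eq_def] at hv
          simp only [if_pos rfl] at hv
          have hlen : rest'.length ≤ n := by simp at hl; omega
          by_cases hc2 : c2 = '\\' ∨ c2 = '[' ∨ c2 = ']'
          · rw [if_pos hc2] at hv
            simp only [if_true] at hv
            obtain ⟨ts, htok, heq⟩ := ih rest' hlen g (acc ++ [String.mk [c2]]) hv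
            refine ⟨pvTok.esc c2 :: ts, ?_, ?_⟩
            · rw [pvTokenize.eq_def]
              simp [htok, hc2]
            · have hA : pvAGo ('\\' :: c2 :: rest') false g acc
                  = pvAGo rest' false g (acc ++ [String.mk [c2]]) := by
                rw [pvAGo.eq_def]
                simp only [if_pos rfl, if_neg (Bool.false_ne_true)]
                rcases hc2 with h | h | h <;> subst h <;> simp [pvAGo] <;> rfl
              rw [hA, heq]
              rfl
          · rw [if_neg hc2] at hv
            exact absurd hv (by simp)
      · have hlen : rest.length ≤ n := by simp at hl; omega
        by_cases hop : c = '['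
        · subst hop
          rcases g with _ | s
          · rw [pvWellFormed.eq_def] at hv
            simp only [if_neg (by decide : ¬(('[' : Char) = '\\')), if_pos rfl,
              Option.isSome_none, Bool.false_eq_true, if_neg (Bool.false_ne_true)] at hv
            obtain ⟨ts, htok, heq⟩ := ih rest hlen (some "") acc (by simpa using hv)
            refine ⟨pvTok.opn :: ts, ?_, ?_⟩
            · rw [pvTokenize.eq_def]
              simp [htok]
            · rw [pvAGo.eq_def]
              simp only [if_neg (by decide : ¬(('[' : Char) = '\\')), if_pos rfl,
                if_neg (Bool.false_ne_true)]
              rw [heq]; rfl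
          · rw [pvWellFormed.eq_def] at hv
            simp only [if_neg (by decide : ¬(('[' : Char) = '\\')), if_pos rfl,
              Option.isSome_some, if_pos rfl] at hv
            exact absurd hv (by simp)
        · by_cases hcl : c = ']'
          · subst hcl
            rcases g with _ | s
            · rw [pvWellFormed.eq_def] at hv
              simp only [if_neg (by decide : ¬((']' : Char) = '\\')),
                if_neg (by decide : ¬((']' : Char) = '[')), if_pos rfl,
                Option.isSome_none, Bool.false_eq_true, if_neg (Bool.false_ne_true)] at hv
              exact absurd hv (by simp)
            · rw [pvWellFormed.eq_def] at hv
              simp only [if_neg (by decide : ¬((']' : Char) = '\\')),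
                if_neg (by decide : ¬((']' : Char) = '[')), if_pos rfl,
                Option.isSome_some, if_pos rfl] at hv
              obtain ⟨ts, htok, heq⟩ := ih rest hlen none (acc ++ [s]) (by simpa using hv)
              refine ⟨pvTok.cls :: ts, ?_, ?_⟩
              · rw [pvTokenize.eq_def]
                simp [htok]
              · rw [pvAGo.eq_def]
                simp only [if_neg (by decide : ¬((']' : Char) = '\\')),
                  if_neg (by decide : ¬((']' : Char) = '[')), if_pos rfl,
                  if_neg (Bool.false_ne_true)]
                rw [heq]; rfl
          · rw [pvWellFormed.eq_def] at hv
            simp only [if_neg hc, if_neg hop, if_neg hcl] at hv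
            rcases g with _ | s
            · obtain ⟨ts, htok, heq⟩ := ih rest hlen none (acc ++ [String.mk [c]]) (by simpa using hv)
              refine ⟨pvTok.chr c :: ts, ?_, ?_⟩
              · rw [pvTokenize.eq_def]
                simp [htok, hc, hop, hcl]
              · rw [pvAGo.eq_def]
                simp only [if_neg hc, if_neg hop, if_neg hcl, if_neg (Bool.false_ne_true)]
                rw [heq]; rfl
            · obtain ⟨ts, htok, heq⟩ := ih rest hlen (some (s.push c)) acc (by simpa using hv)
              refine ⟨pvTok.chr c :: ts, ?_, ?_⟩
              · rw [pvTokenize.eq_def]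
                simp [htok, hc, hop, hcl]
              · rw [pvAGo.eq_def]
                simp only [if_neg hc, if_neg hop, if_neg hcl, if_neg (Bool.false_ne_true)]
                rw [heq]; rfl

-- ===== VERDICT (by name: the statement is the Claim_ definition above) =====
theorem parse_text_into_characters_spec : Claim_equal_parse_text_into_characters := by
  intro text _ hpre
  unfold Spec_parse_text_into_characters parse_text_into_characters parse_text_into_characters_alt
  obtain ⟨ts, htok, heq⟩ :=
    pv_main text.toList.length text.toList le_rfl none [] (by simpa using hpre)
  rw [htok, heq]
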